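-- pv_equiv track=rewrite | github.com/open-intell/CogForge | LexForge.py | _measure_indent
-- ===== SOURCE A (Python) =====
-- def _measure_indent(indent_str: str) -> int:
--     """Measure indentation level in columns (tabs = 8 per Python spec)."""
--     col = 0
--     for ch in indent_str:
--         if ch == "\t":
--             col = (col // 8 + 1) * 8
--         elif ch == " ":
--             col += 1
--     return col
-- ===== SOURCE B (Python) =====
-- def _measure_indent(indent_str: str) -> int:
--     """Measure indentation level in columns (tabs = 8 per Python spec)."""
--     ws = "".join(ch for ch in indent_str if ch in " \t")
--     return len(ws.expandtabs(8))
-- ===== Notes on version B (the rewrite author's own statement) =====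
-- stated objective: idiomatic
-- what changed: B drops the manual column accumulator with the (col//8+1)*8 recurrence and instead keeps only the space/tab characters and delegates tab-stop expansion to str.expandtabs(8), returning the expanded length.
import Mathlib
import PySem

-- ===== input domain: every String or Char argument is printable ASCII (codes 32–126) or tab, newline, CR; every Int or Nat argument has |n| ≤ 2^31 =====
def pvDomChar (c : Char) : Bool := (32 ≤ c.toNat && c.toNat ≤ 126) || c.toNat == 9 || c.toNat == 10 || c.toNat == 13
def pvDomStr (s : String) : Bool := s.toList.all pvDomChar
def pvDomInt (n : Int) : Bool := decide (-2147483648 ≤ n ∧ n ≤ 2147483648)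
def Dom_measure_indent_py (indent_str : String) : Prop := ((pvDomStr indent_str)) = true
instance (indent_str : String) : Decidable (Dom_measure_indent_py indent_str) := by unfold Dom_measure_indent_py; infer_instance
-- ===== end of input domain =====

-- B replaces A's manual (col//8+1)*8 column accumulator by filtering to spaces/tabs and
-- delegating tab expansion to str.expandtabs(8), returning the expanded length (idiomatic).

-- ===== PORT A =====
def measure_indent_py (indent_str : String) : Int :=
  indent_str.toList.foldl
    (fun col ch =>
      if ch = '\t' then (PySem.Int.floordiv col 8 + 1) * 8
      else if ch = ' ' then col + 1
      else col)
    0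

-- ===== PORT B =====
-- hand port of str.expandtabs(8) on a string without newlines: each tab becomes spaces up
-- to the next multiple-of-8 column; exact for the filtered (space/tab-only) string
def pvExpandTabs8 (l : List Char) : List Char :=
  l.foldl
    (fun acc c =>
      if c = '\t' then acc ++ List.replicate (8 - acc.length % 8) ' '
      else acc ++ [c])
    []

def measure_indent_py_alt (indent_str : String) : Int :=
  ((pvExpandTabs8 (indent_str.toList.filter (fun ch => ch = ' ' || ch = '\t'))).length : Int)

-- ===== PRECONDITION & SPEC =====
def Spec_measure_indent_py (indent_str : String) (out : Int) : Prop := out = measure_indent_py_alt indent_str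
instance (indent_str : String) (out : Int) : Decidable (Spec_measure_indent_py indent_str out) := by unfold Spec_measure_indent_py; infer_instance

-- ===== CLAIM (what is proved, stated in full; the proofs are below) =====
def Claim_equal_measure_indent_py : Prop := ∀ (indent_str : String), Dom_measure_indent_py indent_str → Spec_measure_indent_py indent_str (measure_indent_py indent_str)

-- ===== LEMMAS AND PROOFS =====

-- A's loop body
def pvStepA (col : Int) (ch : Char) : Int :=
  if ch = '\t' then (PySem.Int.floordiv col 8 + 1) * 8
  else if ch = ' ' then col + 1
  else col

-- B's expandtabs loop body
def pvStepB (acc : List Char) (c : Char) : List Char :=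
  if c = '\t' then acc ++ List.replicate (8 - acc.length % 8) ' '
  else acc ++ [c]

-- A's fold skips characters other than space and tab, so filtering first is invisible to it
lemma pvFoldA_filter : ∀ (l : List Char) (col : Int),
    l.foldl pvStepA col = (l.filter (fun ch => ch = ' ' || ch = '\t')).foldl pvStepA col := by
  intro l
  induction l with
  | nil => intro col; rfl
  | cons c l ih =>
    intro col
    by_cases hc : (c = ' ' || c = '\t') = true
    · simp [List.filter, hc, List.foldl, ih]
    · have hne : pvStepA col c = col := by
        simp only [Bool.or_eq_true, decide_eq_true_eq] at hc
        push Not at hc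
        simp [pvStepA, hc.1, hc.2]
      simp [List.filter, hc, List.foldl, hne, ih]

-- the single-step correspondence on a space/tab character
lemma pvStep_agree (acc : List Char) (c : Char) (hc : c = ' ' ∨ c = '\t') :
    pvStepA (acc.length : Int) c = ((pvStepB acc c).length : Int) := by
  rcases hc with hc | hc
  · subst hc; simp [pvStepA, pvStepB]
  · subst hc
    have hlen : (pvStepB acc '\t').length = acc.length + (8 - acc.length % 8) := by
      simp [pvStepB]
    have hf : PySem.Int.floordiv ((acc.length : Nat) : Int) ((8 : Nat) : Int)
        = ((acc.length / 8 : Nat) : Int) := PySem.Int.floordiv_natCast acc.length 8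
    have key : (acc.length / 8 + 1) * 8 = acc.length + (8 - acc.length % 8) := by omega
    rw [hlen]
    simp only [pvStepA, if_pos rfl]
    rw [show ((8 : Nat) : Int) = (8 : Int) from rfl] at hf
    rw [hf]
    exact_mod_cast key

-- the loop invariant: A's column equals the length of B's expanded string
lemma pvFold_agree : ∀ (l : List Char), (∀ c ∈ l, c = ' ' ∨ c = '\t') →
    ∀ (acc : List Char), l.foldl pvStepA (acc.length : Int) = (((l.foldl pvStepB acc).length : Nat) : Int) := by
  intro l
  induction l with
  | nil => intro _ acc; rfl
  | cons c l ih =>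
    intro h acc
    have hc : c = ' ' ∨ c = '\t' := h c (by simp)
    simp only [List.foldl]
    rw [pvStep_agree acc c hc]
    exact ih (fun x hx => h x (by simp [hx])) (pvStepB acc c)

-- ===== VERDICT (by name: the statement is the Claim_ definition above) =====
theorem measure_indent_py_spec : Claim_equal_measure_indent_py := by
  intro s _
  unfold Spec_measure_indent_py measure_indent_py measure_indent_py_alt pvExpandTabs8
  have hA : ∀ (l : List Char) (col : Int),
      l.foldl (fun col ch =>
        if ch = '\t' then (PySem.Int.floordiv col 8 + 1) * 8
        else if ch = ' ' then col + 1 else col) col = l.foldl pvStepA col := by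
    intro l col; rfl
  rw [hA, pvFoldA_filter]
  have hmem : ∀ c ∈ s.toList.filter (fun ch => ch = ' ' || ch = '\t'), c = ' ' ∨ c = '\t' := by
    intro c hc
    have := List.of_mem_filter hc
    simpa using this
  have := pvFold_agree (s.toList.filter (fun ch => ch = ' ' || ch = '\t')) hmem []
  simpa using this
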